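-- pv_equiv track=rewrite | github.com/shyampagadi/final_parser_0603 | resume_parser_NEW_FINAL_with_docs/retrieve_jd_matches.py | _extract_skills_pattern_matching
-- ===== SOURCE A (Python) =====
-- from typing import Dict, Any, List, Optional
--
-- def _extract_skills_pattern_matching(job_description: str) -> List[str]:
--     """
--     Extract skills from job description using pattern matching
--
--     Args:
--         job_description: Job description text
--
--     Returns:
--         List of skills
--     """
--     # Simple skill extraction based on common tech terms
--     # In a real implementation, you might use NLP or a more sophisticated approach
--     common_skills = [
--         "python", "java", "javascript", "react", "angular", "node", "aws",
--         "azure", "gcp", "docker", "kubernetes", "sql", "nosql", "mongodb",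
--         "postgresql", "mysql", "oracle", "rest", "api", "microservices",
--         "ci/cd", "devops", "agile", "scrum", "git", "machine learning", "ai",
--         "data science", "big data", "hadoop", "spark", "tableau", "power bi",
--         "excel", "word", "powerpoint", "jira", "confluence", "linux", "unix",
--         "windows", "c#", "c++", "ruby", "php", "html", "css", "sass", "less",
--         "typescript", "vue", "redux", "graphql", "django", "flask", "spring",
--         "hibernate", "jenkins", "terraform", "ansible", "puppet", "chef",
--         "blockchain", "ethereum", "solidity", "ios", "android", "swift",
--         "kotlin", "react native", "flutter", "xamarin", "unity", "unreal",
--         "sap", "salesforce", "dynamics", "sharepoint", "azure devops",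
--         "aws lambda", "serverless", "kafka", "rabbitmq", "redis", "elasticsearch",
--         "kibana", "logstash", "grafana", "prometheus", "datadog", "new relic",
--         "splunk", "sumo logic", "nginx", "apache", "tomcat", "iis", "weblogic",
--         "websphere", "jboss", "wildfly", "maven", "gradle", "npm", "yarn",
--         "webpack", "babel", "jest", "mocha", "cypress", "selenium", "appium",
--         "junit", "testng", "nunit", "xunit", "pytest", "rspec", "cucumber",
--         "gherkin", "bdd", "tdd", "agile", "scrum", "kanban", "lean", "six sigma",
--         "itil", "cobit", "togaf", "prince2", "pmp", "capm", "csm", "safe",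
--         "cisa", "cissp", "ceh", "comptia", "aws certified", "azure certified",
--         "gcp certified", "pci dss", "hipaa", "gdpr", "sox", "iso 27001",
--         "nist", "fedramp", "hitrust", "cmmi", "iso 9001", "iso 14001",
--         "iso 45001", "iso 13485", "fda", "21 cfr part 11", "gxp", "gmp",
--         "glp", "gcp", "gdp", "gtp", "gvp", "gpp", "gep", "gcp", "gsp",
--         "gstp", "gamp", "ispe", "ich", "emea", "fda", "mhra", "pmda",
--         "anvisa", "cofepris", "tga", "hsa", "nmpa", "cdsco", "kfda",
--         "sfda", "tfda", "dgda", "nafdac", "sahpra", "who", "ema",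
--         "edqm", "usp", "bp", "jp", "ph eur", "usp-nf", "jp-nf"
--     ]
--
--     # Extract skills from job description
--     jd_lower = job_description.lower()
--     found_skills = []
--
--     for skill in common_skills:
--         if skill in jd_lower:
--             found_skills.append(skill)
--
--     return found_skills
-- ===== SOURCE B (Python) =====
-- _SKILL_CHUNKS = [
--     "python,java,javascript,react,angular,node,aws,azure,gcp,docker",
--     "kubernetes,sql,nosql,mongodb,postgresql,mysql,oracle,rest,api,microservices",
--     "ci/cd,devops,agile,scrum,git,machine learning,ai,data science,big data,hadoop",
--     "spark,tableau,power bi,excel,word,powerpoint,jira,confluence,linux,unix",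
--     "windows,c#,c++,ruby,php,html,css,sass,less,typescript",
--     "vue,redux,graphql,django,flask,spring,hibernate,jenkins,terraform,ansible",
--     "puppet,chef,blockchain,ethereum,solidity,ios,android,swift,kotlin,react native",
--     "flutter,xamarin,unity,unreal,sap,salesforce,dynamics,sharepoint,azure devops,aws lambda",
--     "serverless,kafka,rabbitmq,redis,elasticsearch,kibana,logstash,grafana,prometheus,datadog",
--     "new relic,splunk,sumo logic,nginx,apache,tomcat,iis,weblogic,websphere,jboss",
--     "wildfly,maven,gradle,npm,yarn,webpack,babel,jest,mocha,cypress",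
--     "selenium,appium,junit,testng,nunit,xunit,pytest,rspec,cucumber,gherkin",
--     "bdd,tdd,agile,scrum,kanban,lean,six sigma,itil,cobit,togaf",
--     "prince2,pmp,capm,csm,safe,cisa,cissp,ceh,comptia,aws certified",
--     "azure certified,gcp certified,pci dss,hipaa,gdpr,sox,iso 27001,nist,fedramp,hitrust",
--     "cmmi,iso 9001,iso 14001,iso 45001,iso 13485,fda,21 cfr part 11,gxp,gmp,glp",
--     "gcp,gdp,gtp,gvp,gpp,gep,gcp,gsp,gstp,gamp",
--     "ispe,ich,emea,fda,mhra,pmda,anvisa,cofepris,tga,hsa",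
--     "nmpa,cdsco,kfda,sfda,tfda,dgda,nafdac,sahpra,who,ema",
--     "edqm,usp,bp,jp,ph eur,usp-nf,jp-nf"
-- ]
--
--
-- def _extract_skills_pattern_matching(job_description: str):
--     """Single left-to-right scan over the text: patterns are grouped by their
--     first character, and at each position only the patterns starting with the
--     character at that position are tried; matches are emitted in list order."""
--     common_skills = [s for chunk in _SKILL_CHUNKS for s in chunk.split(",")]
--     jd = job_description.lower()
--
--     by_first = {}
--     for skill in common_skills:
--         by_first.setdefault(skill[0], []).append(skill)
--
--     hits = set()
--     for i, ch in enumerate(jd):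
--         for skill in by_first.get(ch, []):
--             if skill not in hits and jd.startswith(skill, i):
--                 hits.add(skill)
--
--     return [skill for skill in common_skills if skill in hits]
-- ===== Notes on version B (the rewrite author's own statement) =====
-- stated objective: alternative
-- what changed: Instead of A's one full-text substring scan per pattern, B groups the patterns by first character into a dict and makes a single left-to-right scan of the lowered text, trying at each position only the patterns that start with the character there, then emits the matched patterns in list order.
import Mathlib
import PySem

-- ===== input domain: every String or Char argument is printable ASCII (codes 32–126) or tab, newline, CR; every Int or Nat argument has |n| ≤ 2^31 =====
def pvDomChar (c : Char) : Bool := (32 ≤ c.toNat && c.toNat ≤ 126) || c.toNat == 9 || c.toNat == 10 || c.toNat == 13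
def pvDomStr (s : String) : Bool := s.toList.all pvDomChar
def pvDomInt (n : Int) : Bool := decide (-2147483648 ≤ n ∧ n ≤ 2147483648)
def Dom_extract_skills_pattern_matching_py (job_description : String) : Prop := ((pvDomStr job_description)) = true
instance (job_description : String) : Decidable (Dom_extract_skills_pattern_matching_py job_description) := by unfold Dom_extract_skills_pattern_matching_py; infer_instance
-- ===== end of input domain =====

-- B scans the lowered text once, left to right, trying at each position only the patterns whose
-- first character matches (a dict keyed by first character), instead of A's one full-text
-- substring scan per pattern; objective: alternative, same exact output.

-- ===== PORT A =====
-- the skill list literal of A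
def pvCommonSkills : List String := [
    "python",
    "java",
    "javascript",
    "react",
    "angular",
    "node",
    "aws",
    "azure",
    "gcp",
    "docker",
    "kubernetes",
    "sql",
    "nosql",
    "mongodb",
    "postgresql",
    "mysql",
    "oracle",
    "rest",
    "api",
    "microservices",
    "ci/cd",
    "devops",
    "agile",
    "scrum",
    "git",
    "machine learning",
    "ai",
    "data science",
    "big data",
    "hadoop",
    "spark",
    "tableau",
    "power bi",
    "excel",
    "word",
    "powerpoint",
    "jira",
    "confluence",
    "linux",
    "unix",
    "windows",
    "c#",
    "c++",
    "ruby",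
    "php",
    "html",
    "css",
    "sass",
    "less",
    "typescript",
    "vue",
    "redux",
    "graphql",
    "django",
    "flask",
    "spring",
    "hibernate",
    "jenkins",
    "terraform",
    "ansible",
    "puppet",
    "chef",
    "blockchain",
    "ethereum",
    "solidity",
    "ios",
    "android",
    "swift",
    "kotlin",
    "react native",
    "flutter",
    "xamarin",
    "unity",
    "unreal",
    "sap",
    "salesforce",
    "dynamics",
    "sharepoint",
    "azure devops",
    "aws lambda",
    "serverless",
    "kafka",
    "rabbitmq",
    "redis",
    "elasticsearch",
    "kibana",
    "logstash",
    "grafana",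
    "prometheus",
    "datadog",
    "new relic",
    "splunk",
    "sumo logic",
    "nginx",
    "apache",
    "tomcat",
    "iis",
    "weblogic",
    "websphere",
    "jboss",
    "wildfly",
    "maven",
    "gradle",
    "npm",
    "yarn",
    "webpack",
    "babel",
    "jest",
    "mocha",
    "cypress",
    "selenium",
    "appium",
    "junit",
    "testng",
    "nunit",
    "xunit",
    "pytest",
    "rspec",
    "cucumber",
    "gherkin",
    "bdd",
    "tdd",
    "agile",
    "scrum",
    "kanban",
    "lean",
    "six sigma",
    "itil",
    "cobit",
    "togaf",
    "prince2",
    "pmp",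
    "capm",
    "csm",
    "safe",
    "cisa",
    "cissp",
    "ceh",
    "comptia",
    "aws certified",
    "azure certified",
    "gcp certified",
    "pci dss",
    "hipaa",
    "gdpr",
    "sox",
    "iso 27001",
    "nist",
    "fedramp",
    "hitrust",
    "cmmi",
    "iso 9001",
    "iso 14001",
    "iso 45001",
    "iso 13485",
    "fda",
    "21 cfr part 11",
    "gxp",
    "gmp",
    "glp",
    "gcp",
    "gdp",
    "gtp",
    "gvp",
    "gpp",
    "gep",
    "gcp",
    "gsp",
    "gstp",
    "gamp",
    "ispe",
    "ich",
    "emea",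
    "fda",
    "mhra",
    "pmda",
    "anvisa",
    "cofepris",
    "tga",
    "hsa",
    "nmpa",
    "cdsco",
    "kfda",
    "sfda",
    "tfda",
    "dgda",
    "nafdac",
    "sahpra",
    "who",
    "ema",
    "edqm",
    "usp",
    "bp",
    "jp",
    "ph eur",
    "usp-nf",
    "jp-nf"
]

def extract_skills_pattern_matching_py (job_description : String) : List String :=
  let jd_lower := PySem.Str.lower job_description
  -- found_skills = []; for skill in common_skills: if skill in jd_lower: found_skills.append(skill)
  pvCommonSkills.foldl
    (fun found_skills skill =>
      if PySem.Str.isIn skill jd_lower then found_skills ++ [skill] else found_skills)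
    []

-- ===== PORT B =====
-- B's data: the same skills kept as comma-separated blocks (_SKILL_CHUNKS in Source B)
def pvSkillChunks : List String := [
    "python,java,javascript,react,angular,node,aws,azure,gcp,docker",
    "kubernetes,sql,nosql,mongodb,postgresql,mysql,oracle,rest,api,microservices",
    "ci/cd,devops,agile,scrum,git,machine learning,ai,data science,big data,hadoop",
    "spark,tableau,power bi,excel,word,powerpoint,jira,confluence,linux,unix",
    "windows,c#,c++,ruby,php,html,css,sass,less,typescript",
    "vue,redux,graphql,django,flask,spring,hibernate,jenkins,terraform,ansible",
    "puppet,chef,blockchain,ethereum,solidity,ios,android,swift,kotlin,react native",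
    "flutter,xamarin,unity,unreal,sap,salesforce,dynamics,sharepoint,azure devops,aws lambda",
    "serverless,kafka,rabbitmq,redis,elasticsearch,kibana,logstash,grafana,prometheus,datadog",
    "new relic,splunk,sumo logic,nginx,apache,tomcat,iis,weblogic,websphere,jboss",
    "wildfly,maven,gradle,npm,yarn,webpack,babel,jest,mocha,cypress",
    "selenium,appium,junit,testng,nunit,xunit,pytest,rspec,cucumber,gherkin",
    "bdd,tdd,agile,scrum,kanban,lean,six sigma,itil,cobit,togaf",
    "prince2,pmp,capm,csm,safe,cisa,cissp,ceh,comptia,aws certified",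
    "azure certified,gcp certified,pci dss,hipaa,gdpr,sox,iso 27001,nist,fedramp,hitrust",
    "cmmi,iso 9001,iso 14001,iso 45001,iso 13485,fda,21 cfr part 11,gxp,gmp,glp",
    "gcp,gdp,gtp,gvp,gpp,gep,gcp,gsp,gstp,gamp",
    "ispe,ich,emea,fda,mhra,pmda,anvisa,cofepris,tga,hsa",
    "nmpa,cdsco,kfda,sfda,tfda,dgda,nafdac,sahpra,who,ema",
    "edqm,usp,bp,jp,ph eur,usp-nf,jp-nf"
]

-- hand port of Python's chunk.split(",") — exact for this one-character separator:
-- cut at every comma, empty pieces kept (PySem.Str.split? computes the same lists, but this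
-- structural recursion is what the kernel can evaluate on the chunk literals)
def pvSplitCommas : List Char → List (List Char)
  | [] => [[]]
  | c :: rest =>
    if c = ',' then [] :: pvSplitCommas rest
    else
      match pvSplitCommas rest with
      | w :: ws => (c :: w) :: ws
      | [] => [[c]]

def extract_skills_pattern_matching_py_alt (job_description : String) : List String :=
  -- common_skills = [s for chunk in _SKILL_CHUNKS for s in chunk.split(",")]
  let common_skills := pvSkillChunks.flatMap (fun chunk => (pvSplitCommas chunk.toList).map String.ofList)
  let jd := PySem.Str.lower job_description
  -- by_first = {}; for skill in common_skills: by_first.setdefault(skill[0], []).append(skill)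
  -- (skill[0], a 1-char Python str, is represented as a Char key; every piece of the chunks is
  --  nonempty, so the 'none' branch of pyGet? is unreachable)
  let by_first : PySem.Dict Char (List String) :=
    common_skills.foldl
      (fun d skill =>
        match PySem.Str.pyGet? skill 0 with
        | some c => d.insert c (d.getD c [] ++ [skill])
        | none => d)
      PySem.Dict.empty
  -- hits = set()
  -- for i, ch in enumerate(jd):
  --   for skill in by_first.get(ch, []):
  --     if skill not in hits and jd.startswith(skill, i): hits.add(skill)
  -- (jd.startswith(skill, i) with 0 ≤ i < len(jd) is: skill.toList is a prefix of jd.toList.drop i)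
  let hits : PySem.Set String :=
    (PySem.List.enumerate jd.toList 0).foldl
      (fun hits p =>
        (by_first.getD p.2 []).foldl
          (fun hits skill =>
            if !hits.contains skill && PySem.Chars.startswith (jd.toList.drop p.1.toNat) skill.toList
            then hits.add skill else hits)
          hits)
      PySem.Set.empty
  -- [skill for skill in common_skills if skill in hits]
  common_skills.filter (fun skill => hits.contains skill)

-- ===== PRECONDITION & SPEC =====
def Spec_extract_skills_pattern_matching_py (job_description : String) (out : List String) : Prop := out = extract_skills_pattern_matching_py_alt job_description
instance (job_description : String) (out : List String) : Decidable (Spec_extract_skills_pattern_matching_py job_description out) := by unfold Spec_extract_skills_pattern_matching_py; infer_instance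

-- ===== CLAIM =====
def Claim_equal_extract_skills_pattern_matching_py : Prop := ∀ (job_description : String), Dom_extract_skills_pattern_matching_py job_description → Spec_extract_skills_pattern_matching_py job_description (extract_skills_pattern_matching_py job_description)

-- ===== LEMMAS AND PROOFS =====

set_option maxRecDepth 100000 in
theorem pv_skills_eq :
    pvSkillChunks.flatMap (fun chunk => (pvSplitCommas chunk.toList).map String.ofList) = pvCommonSkills := by
  decide

set_option maxRecDepth 8000 in
theorem pv_skill_nonempty : ∀ s ∈ pvCommonSkills, s.toList ≠ [] := by decide

-- the first-character index maps c to exactly the skills whose first character is c, in order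
theorem pv_byfirst_getD (c : Char) :
    ∀ (l : List String) (d0 : PySem.Dict Char (List String)),
      (l.foldl
        (fun d skill =>
          match PySem.Str.pyGet? skill 0 with
          | some ch => d.insert ch (d.getD ch [] ++ [skill])
          | none => d) d0).getD c []
      = d0.getD c [] ++ l.filter (fun s => s.toList[0]? == some c) := by
  intro l
  induction l with
  | nil => simp
  | cons a t ih =>
    intro d0
    rw [List.foldl_cons]
    have hget : PySem.Str.pyGet? a 0 = a.toList[0]? := by
      simpa using PySem.Str.pyGet?_natCast a 0
    cases ha : PySem.Str.pyGet? a 0 with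
    | none =>
      have ha' : a.toList[0]? = none := by rw [← hget]; exact ha
      rw [ih, List.filter_cons]
      simp [ha']
    | some ch =>
      have ha' : a.toList[0]? = some ch := by rw [← hget]; exact ha
      rw [ih, PySem.Dict.getD_insert, List.filter_cons]
      by_cases hc : c = ch
      · subst hc
        simp [ha']
      · have hpa : (a.toList[0]? == some c) = false := by
          simp [ha']
          exact Ne.symm hc
        simp [hc, hpa]

-- membership after one guarded-add pass
theorem pv_mem_guarded (cond : String → Bool) (x : String) :
    ∀ (l : List String) (s0 : PySem.Set String),
      x ∈ l.foldl (fun h sk => if !h.contains sk && cond sk then h.add sk else h) s0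
        ↔ x ∈ s0 ∨ (x ∈ l ∧ cond x = true) := by
  intro l
  induction l with
  | nil => simp
  | cons a t ih =>
    intro s0
    rw [List.foldl_cons, ih]
    have hstep : x ∈ (if !s0.contains a && cond a then s0.add a else s0)
        ↔ x ∈ s0 ∨ (x = a ∧ cond a = true) := by
      split_ifs with h
      · simp only [Bool.and_eq_true, Bool.not_eq_true'] at h
        rw [PySem.Set.mem_add]
        constructor
        · rintro (hx | rfl)
          · exact Or.inl hx
          · exact Or.inr ⟨rfl, h.2⟩
        · rintro (hx | ⟨rfl, _⟩)
          · exact Or.inl hx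
          · exact Or.inr rfl
      · constructor
        · exact Or.inl
        · rintro (hx | ⟨rfl, hcx⟩)
          · exact hx
          · have hca : s0.contains x = true := by
              cases hcc : s0.contains x with
              | true => rfl
              | false =>
                  exfalso
                  exact h (by rw [hcc, hcx]; rfl)
            exact (PySem.Set.contains_iff _ _).mp hca
    rw [hstep]
    constructor
    · rintro ((hx | ⟨rfl, hca⟩) | ⟨hxt, hcx⟩)
      · exact Or.inl hx
      · exact Or.inr ⟨List.mem_cons_self, hca⟩
      · exact Or.inr ⟨List.mem_cons_of_mem _ hxt, hcx⟩
    · rintro (hx | ⟨hxm, hcx⟩)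
      · exact Or.inl (Or.inl hx)
      · rcases List.mem_cons.mp hxm with rfl | hxt
        · exact Or.inl (Or.inr ⟨rfl, hcx⟩)
        · exact Or.inr ⟨hxt, hcx⟩

-- membership after the whole scan
theorem pv_mem_scan (G : Int × Char → List String) (cond : Int → String → Bool) (x : String) :
    ∀ (E : List (Int × Char)) (s0 : PySem.Set String),
      x ∈ E.foldl
        (fun h p => (G p).foldl
          (fun h sk => if !h.contains sk && cond p.1 sk then h.add sk else h) h) s0
        ↔ x ∈ s0 ∨ ∃ p ∈ E, x ∈ G p ∧ cond p.1 x = true := by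
  intro E
  induction E with
  | nil => simp
  | cons a t ih =>
    intro s0
    rw [List.foldl_cons, ih, pv_mem_guarded]
    simp only [List.mem_cons]
    constructor
    · rintro ((hx | ⟨hg, hc⟩) | ⟨p, hp, hgp, hcp⟩)
      · exact Or.inl hx
      · exact Or.inr ⟨a, Or.inl rfl, hg, hc⟩
      · exact Or.inr ⟨p, Or.inr hp, hgp, hcp⟩
    · rintro (hx | ⟨p, (rfl | hp), hgp, hcp⟩)
      · exact Or.inl (Or.inl hx)
      · exact Or.inl (Or.inr ⟨hgp, hcp⟩)
      · exact Or.inr ⟨p, hp, hgp, hcp⟩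

-- the crux: the scan finds a listed skill iff it occurs in the text
theorem pv_hits_eq (jd s : String) (hs : s ∈ pvCommonSkills) :
    PySem.Set.contains
      ((PySem.List.enumerate jd.toList 0).foldl
        (fun hits p =>
          ((pvCommonSkills.foldl
            (fun d skill =>
              match PySem.Str.pyGet? skill 0 with
              | some c => d.insert c (d.getD c [] ++ [skill])
              | none => d)
            PySem.Dict.empty).getD p.2 []).foldl
            (fun hits skill =>
              if !hits.contains skill && PySem.Chars.startswith (jd.toList.drop p.1.toNat) skill.toList
              then hits.add skill else hits)
            hits)
        PySem.Set.empty) s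
      = PySem.Str.isIn s jd := by
  obtain ⟨c, t, hsl⟩ : ∃ c t, s.toList = c :: t := by
    cases h : s.toList with
    | nil => exact absurd h (pv_skill_nonempty s hs)
    | cons c t => exact ⟨c, t, rfl⟩
  rw [Bool.eq_iff_iff, PySem.Set.contains_iff, PySem.Str.isIn_iff_infix]
  rw [pv_mem_scan (fun p => ((pvCommonSkills.foldl
            (fun d skill =>
              match PySem.Str.pyGet? skill 0 with
              | some ch => d.insert ch (d.getD ch [] ++ [skill])
              | none => d)
            PySem.Dict.empty).getD p.2 []))
        (fun i sk => PySem.Chars.startswith (jd.toList.drop i.toNat) sk.toList) s]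
  constructor
  · rintro (hmem | ⟨p, hpE, hmem, hcond⟩)
    · simp [PySem.Set.empty] at hmem
    · rcases (PySem.List.mem_enumerate_iff _ _ _).mp hpE with ⟨k, hk, rfl⟩
      have hpre : s.toList <+: jd.toList.drop k := by
        have h1 := (PySem.Chars.startswith_iff _ _).mp hcond
        simpa using h1
      exact hpre.isInfix.trans (List.drop_suffix k jd.toList).isInfix
  · rintro ⟨u, v, huv⟩
    have hdrop : jd.toList.drop u.length = s.toList ++ v := by
      rw [← huv, List.append_assoc, List.drop_left]
    have hk : u.length < jd.toList.length := by
      have h := congrArg List.length huv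
      rw [List.length_append, List.length_append, hsl, List.length_cons] at h
      omega
    refine Or.inr ⟨((0 : Int) + u.length, jd.toList[u.length]), ?_, ?_, ?_⟩
    · exact (PySem.List.mem_enumerate_iff _ _ _).mpr ⟨u.length, hk, rfl⟩
    · rw [pv_byfirst_getD, PySem.Dict.getD_empty, List.nil_append, List.mem_filter]
      have hch : jd.toList[u.length] = c := by
        have h1 : jd.toList[u.length]? = (jd.toList.drop u.length).head? := by
          rw [List.head?_drop]
        rw [hdrop, hsl] at h1
        rw [List.getElem?_eq_getElem hk] at h1
        simpa using h1
      refine ⟨hs, ?_⟩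
      rw [hsl, hch]
      simp
    · simp only [Int.zero_add, Int.toNat_natCast]
      exact (PySem.Chars.startswith_iff _ _).mpr (by rw [hdrop]; exact List.prefix_append _ _)

-- ===== VERDICT =====
theorem extract_skills_pattern_matching_py_spec : Claim_equal_extract_skills_pattern_matching_py := by
  intro jd _
  unfold Spec_extract_skills_pattern_matching_py
  simp only [extract_skills_pattern_matching_py, extract_skills_pattern_matching_py_alt,
    pv_skills_eq]
  rw [PySem.List.foldl_append_if_eq_filter, List.nil_append]
  apply List.filter_congr
  intro s hs
  exact (pv_hits_eq (PySem.Str.lower jd) s hs).symm
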